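-- pv_equiv track=rewrite | github.com/barrylellis1/Agent9-HERMES | src/agents/new/a9_nlp_interface_agent.py | _choose_granularity
-- ===== SOURCE A (Python) =====
-- from typing import Any, Dict, List, Optional, Tuple
--
-- def _choose_granularity(typical_timeframes: List[str]) -> Optional[str]:
--     # Prefer Quarterly > Monthly if both present; else first match
--     norm = [str(x).strip().lower() for x in typical_timeframes or []]
--     if any("quarter" in x for x in norm):
--         return "quarter"
--     if any("month" in x for x in norm):
--         return "month"
--     if any("year" in x for x in norm):
--         return "year"
--     return None
-- ===== SOURCE B (Python) =====
-- from typing import Any, Dict, List, Optional, Tuple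
--
-- def _choose_granularity(typical_timeframes: List[str]) -> Optional[str]:
--     # Min-rank reduction: each item maps to a numeric rank (0=quarter, 1=month,
--     # 2=year, 3=no keyword); the answer is the table entry at the minimum rank.
--     LEVELS = ("quarter", "month", "year")
--     best = 3
--     for x in typical_timeframes or []:
--         n = str(x).strip().lower()
--         r = 3
--         for i, k in enumerate(LEVELS):
--             if k in n:
--                 r = i
--                 break
--         best = min(best, r)
--         if best == 0:
--             break
--     return LEVELS[best] if best < 3 else None
-- ===== Notes on version B (the rewrite author's own statement) =====
-- stated objective: alternative
-- what changed: Replaces A's normalized-list plus three sequential any() substring scans with a min-rank reduction: each item is mapped to a numeric rank (0=quarter,1=month,2=year,3=none), the minimum rank is folded with early exit at 0, and the result is a table lookup LEVELS[best].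
import Mathlib
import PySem

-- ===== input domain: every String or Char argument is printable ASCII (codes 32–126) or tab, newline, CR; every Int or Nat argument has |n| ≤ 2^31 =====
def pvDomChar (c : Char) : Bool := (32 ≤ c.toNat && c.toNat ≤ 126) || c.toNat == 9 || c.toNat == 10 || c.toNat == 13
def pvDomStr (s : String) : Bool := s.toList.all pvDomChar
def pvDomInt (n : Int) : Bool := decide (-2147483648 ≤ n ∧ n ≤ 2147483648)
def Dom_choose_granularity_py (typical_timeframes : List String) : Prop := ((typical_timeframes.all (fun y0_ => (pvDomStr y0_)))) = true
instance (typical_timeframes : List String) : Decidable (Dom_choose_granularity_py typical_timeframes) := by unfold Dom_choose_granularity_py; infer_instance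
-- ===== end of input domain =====

-- ===== PORT A =====
-- B replaces A's three any() substring scans with a min-rank reduction (numeric rank per item, fold the minimum with early exit, table lookup); objective: alternative.
def choose_granularity_py (typical_timeframes : List String) : Option String :=
  let norm := typical_timeframes.map (fun x => PySem.Str.lower (PySem.Str.strip x))
  if norm.any (fun x => PySem.Str.isIn "quarter" x) then some "quarter"
  else if norm.any (fun x => PySem.Str.isIn "month" x) then some "month"
  else if norm.any (fun x => PySem.Str.isIn "year" x) then some "year"
  else none

-- ===== PORT B =====
def cgLevels : List String := ["quarter", "month", "year"]

-- inner loop of B: index of the first level contained in n, else 3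
def cgRank (n : String) : Int :=
  (PySem.List.enumerate cgLevels).foldl
    (fun r ik => if r = 3 ∧ PySem.Str.isIn ik.2 n then ik.1 else r) 3

-- outer loop of B: fold the minimum rank, breaking once it reaches 0
def cgLoop : List String → Int → Int
  | [], best => best
  | x :: t, best =>
      let n := PySem.Str.lower (PySem.Str.strip x)
      let best' := min best (cgRank n)
      if best' = 0 then best' else cgLoop t best'

def choose_granularity_py_alt (typical_timeframes : List String) : Option String :=
  let best := cgLoop typical_timeframes 3
  if best < 3 then PySem.List.pyGet? cgLevels best else none

-- ===== PRECONDITION & SPEC =====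
def Spec_choose_granularity_py (typical_timeframes : List String) (out : Option String) : Prop := out = choose_granularity_py_alt typical_timeframes
instance (typical_timeframes : List String) (out : Option String) : Decidable (Spec_choose_granularity_py typical_timeframes out) := by unfold Spec_choose_granularity_py; infer_instance

-- ===== CLAIM (what is proved, stated in full; the proofs are below) =====
def Claim_equal_choose_granularity_py : Prop := ∀ (typical_timeframes : List String), Dom_choose_granularity_py typical_timeframes → Spec_choose_granularity_py typical_timeframes (choose_granularity_py typical_timeframes)

-- ===== LEMMAS AND PROOFS =====

-- rank of one normalized string, characterized by the three membership tests
theorem cgRank_eq (n : String) :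
    cgRank n = if PySem.Str.isIn "quarter" n then 0
               else if PySem.Str.isIn "month" n then 1
               else if PySem.Str.isIn "year" n then 2 else 3 := by
  unfold cgRank cgLevels
  simp only [PySem.List.enumerate_cons, PySem.List.enumerate_nil, List.foldl_cons, List.foldl_nil]
  cases PySem.Str.isIn "quarter" n <;> cases PySem.Str.isIn "month" n <;>
    cases PySem.Str.isIn "year" n <;> norm_num

-- the ideal minimum rank of a list (references A's three scans)
def cgM (xs : List String) : Int :=
  if xs.any (fun x => PySem.Str.isIn "quarter" (PySem.Str.lower (PySem.Str.strip x))) then 0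
  else if xs.any (fun x => PySem.Str.isIn "month" (PySem.Str.lower (PySem.Str.strip x))) then 1
  else if xs.any (fun x => PySem.Str.isIn "year" (PySem.Str.lower (PySem.Str.strip x))) then 2
  else 3

theorem cgM_bounds (xs : List String) : 0 ≤ cgM xs ∧ cgM xs ≤ 3 := by
  unfold cgM; split_ifs <;> omega

theorem cgRank_bounds (n : String) : 0 ≤ cgRank n ∧ cgRank n ≤ 3 := by
  rw [cgRank_eq]; split_ifs <;> omega

-- the abstract boolean shape of cgM_cons, settled by case enumeration
theorem cg_ite_min (qa ma ya qt mt yt : Bool) :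
    (if (qa || qt) then (0:Int) else if (ma || mt) then 1 else if (ya || yt) then 2 else 3)
    = min (if qa then (0:Int) else if ma then 1 else if ya then 2 else 3)
          (if qt then (0:Int) else if mt then 1 else if yt then 2 else 3) := by
  revert qa ma ya qt mt yt; decide

theorem cgM_cons (a : String) (t : List String) :
    cgM (a :: t) = min (cgRank (PySem.Str.lower (PySem.Str.strip a))) (cgM t) := by
  rw [cgRank_eq]
  simp only [cgM, List.any_cons]
  exact cg_ite_min _ _ _ _ _ _

-- the early-exit min fold computes the minimum of b and the ideal minimum rank
theorem cgLoop_eq (xs : List String) : ∀ b : Int, 0 ≤ b → b ≤ 3 →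
    cgLoop xs b = min b (cgM xs) := by
  induction xs with
  | nil =>
      intro b h0 h3
      simp only [cgLoop, cgM, List.any_nil, if_neg Bool.false_ne_true]; omega
  | cons a t ih =>
      intro b h0 h3
      unfold cgLoop
      dsimp only
      rw [cgM_cons]
      have hr := cgRank_bounds (PySem.Str.lower (PySem.Str.strip a))
      have hM := cgM_bounds t
      by_cases h : min b (cgRank (PySem.Str.lower (PySem.Str.strip a))) = 0
      · rw [if_pos h]; omega
      · rw [if_neg h, ih _ (by omega) (by omega)]; omega

-- ===== VERDICT (by name: the statement is the Claim_ definition above) =====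
theorem choose_granularity_py_spec : Claim_equal_choose_granularity_py := by
  intro xs _
  unfold Spec_choose_granularity_py choose_granularity_py choose_granularity_py_alt
  rw [cgLoop_eq xs 3 (by omega) (by omega)]
  simp only [cgM, List.any_map, Function.comp_def]
  split_ifs <;> first
    | rfl
    | decide
    | omega
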